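-- pv_equiv track=rewrite | github.com/CausticH/toy-model-sp2-Crings-2D-structure | multiple_symmetric_growth_v0.py | get_symmetric_equivalents_axial
-- ===== SOURCE A (Python) =====
-- def get_symmetric_equivalents_axial(pos, symmetry):
--     """
--     Return axial (q,r) orbit for the given symmetry with a CONSISTENT order:
--     C6: 0, +60, +120, +180, +240, +300
--     C3: 0, +120, +240
--     C2: 0, +180
--     mirror: identity, mirror
--     C1/asymmetric: identity
--     """
--     def axial_to_cube(q, r):
--         # pointy-top axial: q, r; cube: (x, y, z) with x + y + z = 0
--         x = q
--         z = r
--         y = -x - z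
--         return (x, y, z)
--
--     def cube_to_axial(x, y, z):
--         return (x, z)
--
--     def rot60_cube(x, y, z):
--         # +60° rotation on cube coords: (x,y,z) -> (-z, -x, -y)
--         return (-z, -x, -y)
--
--     def rot_k_times(q, r, k):
--         x, y, z = axial_to_cube(q, r)
--         for _ in range(k):
--             x, y, z = rot60_cube(x, y, z)
--         return cube_to_axial(x, y, z)
--
--     q, r = pos
--
--     if symmetry == 'C6':
--         return [rot_k_times(q, r, k) for k in range(6)]
--     elif symmetry == 'C3':
--         return [rot_k_times(q, r, k) for k in (0, 2, 4)]
--     elif symmetry == 'C2':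
--         return [rot_k_times(q, r, k) for k in (0, 3)]
--     elif symmetry == 'mirror':
--         # mirror across the vertical axis in axial (pointy-top); here we mirror (q,r)->(-q-r, r)
--         return [(q, r), (-q - r, r)]
--     else:  # 'C1' or 'asymmetric'
--         return [(q, r)]
-- ===== SOURCE B (Python) =====
-- def get_symmetric_equivalents_axial(pos, symmetry):
--     # Closed-form axial rotation table instead of cube-coordinate iteration.
--     q, r = pos
--     if symmetry == 'mirror':
--         return [(q, r), (-q - r, r)]
--     step = {'C6': 1, 'C3': 2, 'C2': 3}.get(symmetry)
--     if step is None: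
--         return [(q, r)]
--     orbit = [(q, r), (-r, q + r), (-q - r, q), (-q, -r), (r, -q - r), (q + r, -q)]
--     return orbit[::step]
-- ===== Notes on version B (the rewrite author's own statement) =====
-- stated objective: simpler
-- what changed: Replaces the axial->cube->iterated-rot60->axial machinery with a precomputed closed-form axial rotation table of all six positions, a dict step lookup, and one slice orbit[::step] per symmetry.
import Mathlib
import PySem

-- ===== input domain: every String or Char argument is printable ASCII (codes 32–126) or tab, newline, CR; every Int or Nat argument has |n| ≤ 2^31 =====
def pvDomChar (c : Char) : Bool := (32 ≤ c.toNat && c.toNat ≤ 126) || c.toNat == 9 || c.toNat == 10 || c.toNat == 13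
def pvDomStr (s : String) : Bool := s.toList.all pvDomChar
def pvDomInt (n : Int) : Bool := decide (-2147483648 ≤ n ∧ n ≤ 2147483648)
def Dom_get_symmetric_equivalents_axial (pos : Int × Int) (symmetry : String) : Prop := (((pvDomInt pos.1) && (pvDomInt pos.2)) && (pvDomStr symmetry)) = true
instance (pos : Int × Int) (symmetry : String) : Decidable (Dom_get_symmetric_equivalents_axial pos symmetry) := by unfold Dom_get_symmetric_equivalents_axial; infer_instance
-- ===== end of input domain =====

-- B replaces A's cube-coordinate rotation loop with a closed-form six-entry axial rotation table plus slicing (simpler).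

-- ===== PORT A =====
def pvA_axial_to_cube (q r : Int) : Int × Int × Int := (q, -q - r, r)

def pvA_cube_to_axial (x : Int) (_y : Int) (z : Int) : Int × Int := (x, z)

def pvA_rot60_cube (x y z : Int) : Int × Int × Int := (-z, -x, -y)

def pvA_rot_k_times (q r : Int) (k : Nat) : Int × Int :=
  let c := pvA_axial_to_cube q r
  let c := (List.range k).foldl (fun (t : Int × Int × Int) _ => pvA_rot60_cube t.1 t.2.1 t.2.2) c
  pvA_cube_to_axial c.1 c.2.1 c.2.2

def get_symmetric_equivalents_axial (pos : Int × Int) (symmetry : String) : List (Int × Int) :=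
  let q := pos.1
  let r := pos.2
  if symmetry == "C6" then
    (List.range 6).map (fun k => pvA_rot_k_times q r k)
  else if symmetry == "C3" then
    [0, 2, 4].map (fun k => pvA_rot_k_times q r k)
  else if symmetry == "C2" then
    [0, 3].map (fun k => pvA_rot_k_times q r k)
  else if symmetry == "mirror" then
    [(q, r), (-q - r, r)]
  else
    [(q, r)]

-- ===== PORT B =====
def get_symmetric_equivalents_axial_alt (pos : Int × Int) (symmetry : String) : List (Int × Int) :=
  let q := pos.1
  let r := pos.2
  if symmetry == "mirror" then
    [(q, r), (-q - r, r)]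
  else
    match (PySem.Dict.ofList [("C6", (1 : Int)), ("C3", 2), ("C2", 3)]).get? symmetry with
    | none => [(q, r)]
    | some step =>
      let orbit : List (Int × Int) :=
        [(q, r), (-r, q + r), (-q - r, q), (-q, -r), (r, -q - r), (q + r, -q)]
      (PySem.List.slice? orbit none none step).getD []

-- ===== PRECONDITION & SPEC =====
def Spec_get_symmetric_equivalents_axial (pos : Int × Int) (symmetry : String) (out : List (Int × Int)) : Prop := out = get_symmetric_equivalents_axial_alt pos symmetry
instance (pos : Int × Int) (symmetry : String) (out : List (Int × Int)) : Decidable (Spec_get_symmetric_equivalents_axial pos symmetry out) := by unfold Spec_get_symmetric_equivalents_axial; infer_instance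

-- ===== CLAIM (what is proved, stated in full; the proofs are below) =====
def Claim_equal_get_symmetric_equivalents_axial : Prop := ∀ (pos : Int × Int) (symmetry : String), Dom_get_symmetric_equivalents_axial pos symmetry → Spec_get_symmetric_equivalents_axial pos symmetry (get_symmetric_equivalents_axial pos symmetry)

-- ===== LEMMAS AND PROOFS =====
theorem pv_get_step (s : String) :
    (PySem.Dict.ofList [("C6", (1 : Int)), ("C3", 2), ("C2", 3)]).get? s =
      if s = "C6" then some 1 else if s = "C3" then some 2
      else if s = "C2" then some 3 else none := by
  simp [PySem.Dict.ofList, PySem.Dict.update, PySem.Dict.get?_insert, PySem.Dict.get?_empty]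
  split_ifs <;> simp_all

theorem pv_equal (pos : Int × Int) (symmetry : String) :
    get_symmetric_equivalents_axial pos symmetry = get_symmetric_equivalents_axial_alt pos symmetry := by
  obtain ⟨q, r⟩ := pos
  by_cases h6 : symmetry = "C6" <;> by_cases h3 : symmetry = "C3" <;>
    by_cases h2 : symmetry = "C2" <;> by_cases hm : symmetry = "mirror" <;>
    simp_all [get_symmetric_equivalents_axial, get_symmetric_equivalents_axial_alt, pv_get_step] <;>
    simp [List.range_succ, pvA_rot_k_times, pvA_axial_to_cube, pvA_rot60_cube,
      pvA_cube_to_axial, PySem.List.slice?, PySem.List.sliceIndices] <;>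
    norm_num [PySem.List.pyGet?, PySem.List.pyIdx?, sub_eq_add_neg, Prod.ext_iff] <;> ring

-- ===== VERDICT (by name: the statement is the Claim_ definition above) =====
theorem get_symmetric_equivalents_axial_spec : Claim_equal_get_symmetric_equivalents_axial := by
  intro pos symmetry _
  exact pv_equal pos symmetry
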